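-- pv_equiv track=rewrite | github.com/kkaixiao/pythonalgo2 | leet_0832_flipping_an_image.py | flipAndInvertImage
-- ===== SOURCE A (Python) =====
-- from typing import List
--
-- def flipAndInvertImage(A: List[List[int]]) -> List[List[int]]:
--     w = len(A[0])
--     for row in A:
--
--         for i in range(w // 2):
--             if row[i] == row[w - i - 1]:
--                 row[i], row[w - i - 1] = row[i] ^ 1, row[w - i - 1] ^ 1
--
--     if len(A[0]) % 2:
--         for row in A:
--             row[w // 2] = row[w // 2] ^ 1
--
--     return A
-- ===== SOURCE B (Python) =====
-- from typing import List
--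
-- def flipAndInvertImage(A: List[List[int]]) -> List[List[int]]:
--     # Same in-place mutation as A (rows rewritten via slice assignment), same return.
--     w = len(A[0])
--     for row in A:
--         row[:w] = [x ^ (1 if x == row[w - 1 - i] else 0) for i, x in enumerate(row[:w])]
--     return A
-- ===== Notes on version B (the rewrite author's own statement) =====
-- stated objective: simpler
-- what changed: A does a half-range conditional pair-swap loop plus a separate odd-middle-column pass per row; B rebuilds each row's first w entries in a single full-width comprehension that XORs every entry with an indicator of whether it equals its mirror entry.
import Mathlib
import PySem

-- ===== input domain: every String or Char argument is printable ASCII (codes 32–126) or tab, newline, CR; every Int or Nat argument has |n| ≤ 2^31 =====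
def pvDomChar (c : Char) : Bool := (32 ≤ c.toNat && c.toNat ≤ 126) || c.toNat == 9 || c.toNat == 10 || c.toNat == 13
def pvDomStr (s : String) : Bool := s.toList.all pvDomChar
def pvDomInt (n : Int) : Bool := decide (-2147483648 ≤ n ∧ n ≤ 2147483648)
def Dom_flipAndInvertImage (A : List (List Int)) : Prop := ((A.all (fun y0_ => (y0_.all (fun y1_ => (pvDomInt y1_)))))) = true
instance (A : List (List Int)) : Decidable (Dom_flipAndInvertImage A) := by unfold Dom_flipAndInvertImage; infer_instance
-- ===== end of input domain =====

-- B replaces A's half-range conditional pair-swap loop plus the separate odd-middle-column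
-- pass by one full-width rebuild of each row (objective: simpler).  Both A and B mutate the
-- rows of A in place and return the same list object; the equivalence proved here is about
-- the return value.

-- ===== PORT A =====
-- one iteration of A's inner 'for i in range(w // 2)' loop, mutating one row
def flipStep (w : Nat) (r : List Int) (i : Nat) : List Int :=
  let a := r.getD i 0
  let b := r.getD (w - i - 1) 0
  if a == b then (r.set i (PySem.Int.bxor a 1)).set (w - i - 1) (PySem.Int.bxor b 1) else r

def pyFlipPairs (w : Nat) (row : List Int) : List Int :=
  (List.range (w / 2)).foldl (flipStep w) row

def flipAndInvertImage (A : List (List Int)) : List (List Int) :=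
  let w := (A.headD []).length
  let A1 := A.map (pyFlipPairs w)
  -- Python re-reads len(A[0]) here; row lengths are unchanged by the first pass, so it is w
  if w % 2 = 1 then
    A1.map (fun row => row.set (w / 2) (PySem.Int.bxor (row.getD (w / 2) 0) 1))
  else A1

-- ===== PORT B =====
def flipAndInvertImage_alt (A : List (List Int)) : List (List Int) :=
  let w := (A.headD []).length
  A.map (fun row =>
    ((row.take w).mapIdx (fun i x =>
        PySem.Int.bxor x (if x == row.getD (w - 1 - i) 0 then 1 else 0))) ++ row.drop w)

-- ===== PRECONDITION & SPEC =====
-- Pre_ excludes exactly the inputs where Python A raises IndexError: the empty list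
-- (len(A[0])) and inputs with a row shorter than the first row.
def Pre_flipAndInvertImage (A : List (List Int)) : Prop :=
  A ≠ [] ∧ ∀ row ∈ A, (A.headD []).length ≤ row.length
instance (A : List (List Int)) : Decidable (Pre_flipAndInvertImage A) := by
  unfold Pre_flipAndInvertImage; infer_instance
def pvWitness_flipAndInvertImage : List (List Int) := [[1, 0], [0, 1]]
def Spec_flipAndInvertImage (A : List (List Int)) (out : List (List Int)) : Prop := out = flipAndInvertImage_alt A
instance (A : List (List Int)) (out : List (List Int)) : Decidable (Spec_flipAndInvertImage A out) := by unfold Spec_flipAndInvertImage; infer_instance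

-- ===== CLAIM (what is proved, stated in full; the proofs are below) =====
def Claim_equal_flipAndInvertImage : Prop := ∀ (A : List (List Int)), Dom_flipAndInvertImage A → Pre_flipAndInvertImage A → Spec_flipAndInvertImage A (flipAndInvertImage A)

-- ===== LEMMAS AND PROOFS =====

-- the common per-entry value: flip entry j iff it equals its mirror entry
def gval (w : Nat) (row : List Int) (j : Nat) : Int :=
  if row.getD j 0 == row.getD (w - 1 - j) 0 then PySem.Int.bxor (row.getD j 0) 1 else row.getD j 0

theorem foldl_flipStep_length (w : Nat) (l : List Nat) (row : List Int) :
    (l.foldl (flipStep w) row).length = row.length := by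
  induction l generalizing row with
  | nil => rfl
  | cons i t ih =>
      rw [List.foldl_cons, ih]
      simp only [flipStep]
      split <;> simp

theorem foldl_flipStep_getD (w : Nat) (row : List Int) (hw : w ≤ row.length)
    (n : Nat) (hn : n ≤ w / 2) : ∀ (j : Nat),
    ((List.range n).foldl (flipStep w) row).getD j 0 =
    if j < n ∨ (w - n ≤ j ∧ j < w) then gval w row j else row.getD j 0 := by
  induction n with
  | zero =>
      intro j
      simp only [List.range_zero, List.foldl_nil]
      rw [if_neg (by omega)]
  | succ n ih =>
      intro j
      have hn' : n ≤ w / 2 := Nat.le_of_succ_le hn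
      have h2 : 2 * (n + 1) ≤ w := by
        have := Nat.mul_le_mul_left 2 hn
        omega
      rw [List.range_succ, List.foldl_append, List.foldl_cons, List.foldl_nil]
      set r := (List.range n).foldl (flipStep w) row with hr
      have hlen : r.length = row.length := foldl_flipStep_length w _ row
      have ha : r.getD n 0 = row.getD n 0 := by
        rw [ih hn' _, if_neg (by omega)]
      have hb : r.getD (w - n - 1) 0 = row.getD (w - n - 1) 0 := by
        rw [ih hn' _, if_neg (by omega)]
      have hmirror : w - 1 - (w - n - 1) = n := by omega
      unfold flipStep
      simp only [ha, hb]
      by_cases hc : row.getD n 0 = row.getD (w - n - 1) 0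
      · rw [if_pos (by exact beq_iff_eq.mpr hc)]
        by_cases hj1 : j = w - n - 1
        · subst hj1
          rw [List.getD_eq_getElem?_getD, List.getElem?_set_self
              (by rw [List.length_set, hlen]; omega)]
          simp only [Option.getD_some]
          rw [if_pos (by omega)]
          unfold gval
          rw [hmirror, if_pos (by exact beq_iff_eq.mpr hc.symm)]
        · by_cases hj2 : j = n
          · subst hj2
            rw [List.getD_eq_getElem?_getD, List.getElem?_set_ne (by omega),
                List.getElem?_set_self (by rw [hlen]; omega)]
            simp only [Option.getD_some]
            rw [if_pos (by omega)]
            unfold gval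
            rw [show w - 1 - j = w - j - 1 from by omega]
            rw [if_pos (by exact beq_iff_eq.mpr hc)]
          · rw [List.getD_eq_getElem?_getD, List.getElem?_set_ne (by omega),
                List.getElem?_set_ne (by omega), ← List.getD_eq_getElem?_getD, ih hn' _]
            by_cases ho : j < n ∨ (w - n ≤ j ∧ j < w)
            · rw [if_pos ho, if_pos (by omega)]
            · rw [if_neg ho, if_neg (by omega)]
      · rw [if_neg (by simpa using hc)]
        rw [ih hn' _]
        by_cases hj1 : j = w - n - 1
        · subst hj1
          rw [if_neg (by omega), if_pos (by omega)]
          unfold gval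
          rw [hmirror, if_neg (by simpa using fun h => hc h.symm)]
        · by_cases hj2 : j = n
          · subst hj2
            rw [if_neg (by omega), if_pos (by omega)]
            unfold gval
            rw [show w - 1 - j = w - j - 1 from by omega]
            rw [if_neg (by simpa using hc)]
          · by_cases ho : j < n ∨ (w - n ≤ j ∧ j < w)
            · rw [if_pos ho, if_pos (by omega)]
            · rw [if_neg ho, if_neg (by omega)]

theorem pyFlipPairs_length (w : Nat) (row : List Int) :
    (pyFlipPairs w row).length = row.length :=
  foldl_flipStep_length w _ row

theorem pyFlipPairs_getD (w : Nat) (row : List Int) (hw : w ≤ row.length) (j : Nat) :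
    (pyFlipPairs w row).getD j 0 =
    if j < w / 2 ∨ (w - w / 2 ≤ j ∧ j < w) then gval w row j else row.getD j 0 :=
  foldl_flipStep_getD w row hw (w / 2) (le_refl _) j

-- per-row values of the B port
theorem rowB_length (w : Nat) (row : List Int) (hw : w ≤ row.length) :
    (((row.take w).mapIdx (fun i x =>
        PySem.Int.bxor x (if x == row.getD (w - 1 - i) 0 then 1 else 0))) ++ row.drop w).length
      = row.length := by
  simp [Nat.min_eq_left hw]; omega

theorem rowB_getD (w : Nat) (row : List Int) (hw : w ≤ row.length) (j : Nat)
    (hj : j < row.length) :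
    (((row.take w).mapIdx (fun i x =>
        PySem.Int.bxor x (if x == row.getD (w - 1 - i) 0 then 1 else 0))) ++ row.drop w).getD j 0
      = if j < w then gval w row j else row.getD j 0 := by
  have hlt : (List.mapIdx (fun i x =>
      PySem.Int.bxor x (if x == row.getD (w - 1 - i) 0 then 1 else 0)) (row.take w)).length
      = w := by simp [Nat.min_eq_left hw]
  by_cases hjw : j < w
  · rw [if_pos hjw, List.getD_eq_getElem?_getD, List.getElem?_append_left (by omega)]
    rw [List.getElem?_mapIdx, List.getElem?_take_of_lt hjw]
    have hlem : row[j]? = some row[j] := List.getElem?_eq_getElem hj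
    rw [hlem]
    simp only [Option.map_some, Option.getD_some]
    unfold gval
    rw [show row.getD j 0 = row[j] from List.getD_eq_getElem row 0 hj]
    split <;> simp
  · rw [if_neg hjw, List.getD_eq_getElem?_getD, List.getElem?_append_right (by omega), hlt,
        List.getElem?_drop, ← List.getD_eq_getElem?_getD]
    congr 1
    omega

-- the two per-row transformations agree (including the odd-middle pass of A)
theorem row_eq (w : Nat) (row : List Int) (hw : w ≤ row.length) :
    (if w % 2 = 1 then
        (pyFlipPairs w row).set (w / 2) (PySem.Int.bxor ((pyFlipPairs w row).getD (w / 2) 0) 1)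
      else pyFlipPairs w row)
    = ((row.take w).mapIdx (fun i x =>
        PySem.Int.bxor x (if x == row.getD (w - 1 - i) 0 then 1 else 0))) ++ row.drop w := by
  have hplen := pyFlipPairs_length w row
  have hblen := rowB_length w row hw
  by_cases hodd : w % 2 = 1
  · rw [if_pos hodd]
    apply List.ext_getElem
    · rw [List.length_set, hplen, hblen]
    · intro j hj1 hj2
      have hjlen : j < row.length := by
        have := hj1
        simp only [List.length_set, hplen] at this
        exact this
      rw [show ((pyFlipPairs w row).set (w / 2)
            (PySem.Int.bxor ((pyFlipPairs w row).getD (w / 2) 0) 1))[j] =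
            ((pyFlipPairs w row).set (w / 2)
            (PySem.Int.bxor ((pyFlipPairs w row).getD (w / 2) 0) 1)).getD j 0 from
            (List.getD_eq_getElem _ _ hj1).symm,
          show (((row.take w).mapIdx (fun i x =>
            PySem.Int.bxor x (if x == row.getD (w - 1 - i) 0 then 1 else 0))) ++ row.drop w)[j] =
            (((row.take w).mapIdx (fun i x =>
            PySem.Int.bxor x (if x == row.getD (w - 1 - i) 0 then 1 else 0))) ++ row.drop w).getD j 0 from
            (List.getD_eq_getElem _ _ hj2).symm]
      rw [rowB_getD w row hw j hjlen]
      by_cases hjm : j = w / 2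
      · subst hjm
        rw [List.getD_eq_getElem?_getD, List.getElem?_set_self (by omega)]
        simp only [Option.getD_some]
        rw [pyFlipPairs_getD w row hw, if_neg (by omega)]
        rw [if_pos (by omega)]
        unfold gval
        have hm : w - 1 - w / 2 = w / 2 := by omega
        rw [hm, if_pos (by simp)]
      · rw [List.getD_eq_getElem?_getD, List.getElem?_set_ne (by omega),
            ← List.getD_eq_getElem?_getD, pyFlipPairs_getD w row hw]
        by_cases hjw : j < w
        · rw [if_pos (by omega), if_pos hjw]
        · rw [if_neg (by omega), if_neg hjw]
  · rw [if_neg hodd]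
    apply List.ext_getElem
    · rw [hplen, hblen]
    · intro j hj1 hj2
      have hjlen : j < row.length := by
        have := hj1
        simp only [hplen] at this
        exact this
      rw [show (pyFlipPairs w row)[j] = (pyFlipPairs w row).getD j 0 from
            (List.getD_eq_getElem _ _ hj1).symm,
          show (((row.take w).mapIdx (fun i x =>
            PySem.Int.bxor x (if x == row.getD (w - 1 - i) 0 then 1 else 0))) ++ row.drop w)[j] =
            (((row.take w).mapIdx (fun i x =>
            PySem.Int.bxor x (if x == row.getD (w - 1 - i) 0 then 1 else 0))) ++ row.drop w).getD j 0 from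
            (List.getD_eq_getElem _ _ hj2).symm]
      rw [pyFlipPairs_getD w row hw, rowB_getD w row hw j hjlen]
      by_cases hjw : j < w
      · rw [if_pos (by omega), if_pos hjw]
      · rw [if_neg (by omega), if_neg hjw]

-- ===== VERDICT (by name: the statement is the Claim_ definition above) =====
theorem flipAndInvertImage_spec : Claim_equal_flipAndInvertImage := by
  intro A _ hPre
  obtain ⟨hne, hrows⟩ := hPre
  unfold Spec_flipAndInvertImage flipAndInvertImage flipAndInvertImage_alt
  simp only []
  set w := (A.headD []).length with hwdef
  by_cases hodd : w % 2 = 1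
  · rw [if_pos hodd, List.map_map]
    apply List.map_congr_left
    intro row hrow
    have hw : w ≤ row.length := hrows row hrow
    have h := row_eq w row hw
    rw [if_pos hodd] at h
    simpa using h
  · rw [if_neg hodd]
    apply List.map_congr_left
    intro row hrow
    have hw : w ≤ row.length := hrows row hrow
    have h := row_eq w row hw
    rw [if_neg hodd] at h
    exact h
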